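-- pv_equiv track=rewrite | github.com/cmoney113/ProjectBabel | src/ui/pages/voice_ai_page/widgets/transcription_panel.py | _is_search_query
-- ===== SOURCE A (Python) =====
-- def _is_search_query(text: str) -> bool:
--     """Check if text looks like a search query"""
--     search_keywords = [
--         "what",
--         "how",
--         "why",
--         "when",
--         "where",
--         "who",
--         "explain",
--         "search",
--         "find",
--         "latest",
--         "news",
--         "?",
--         "tell me",
--     ]
--     return any(
--         text.lower().startswith(kw) or f" {kw}" in text.lower()
--         for kw in search_keywords
--     )
-- ===== SOURCE B (Python) =====
-- def _is_search_query(text: str) -> bool: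
--     """Check if text looks like a search query (single left-to-right scan)."""
--     keywords = (
--         "what", "how", "why", "when", "where", "who", "explain",
--         "search", "find", "latest", "news", "?", "tell me",
--     )
--     t = text.lower()
--     boundary = True  # position 0, or the previous character was a space
--     for i, ch in enumerate(t):
--         if boundary and any(t.startswith(kw, i) for kw in keywords):
--             return True
--         boundary = ch == " "
--     return False
-- ===== Notes on version B (the rewrite author's own statement) =====
-- stated objective: alternative
-- what changed: A runs 13 independent startswith/substring scans over the text (one per keyword); B lowers the text once and makes a single left-to-right scan, testing keywords only at word-boundary positions (start of string or right after a space).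
import Mathlib
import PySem

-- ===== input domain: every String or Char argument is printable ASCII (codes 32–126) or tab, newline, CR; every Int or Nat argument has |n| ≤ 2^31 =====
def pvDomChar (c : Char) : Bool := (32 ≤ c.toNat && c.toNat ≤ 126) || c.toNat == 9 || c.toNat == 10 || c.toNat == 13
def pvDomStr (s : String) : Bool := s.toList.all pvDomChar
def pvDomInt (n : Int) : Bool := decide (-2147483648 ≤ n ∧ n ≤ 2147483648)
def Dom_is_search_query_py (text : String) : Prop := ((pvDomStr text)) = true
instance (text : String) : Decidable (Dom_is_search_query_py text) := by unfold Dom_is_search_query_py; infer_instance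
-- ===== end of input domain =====

-- B replaces A's 13 independent substring scans of the text by one left-to-right scan that
-- tests keywords only at word boundaries (start of string or after a space); objective: alternative.

-- ===== PORT A =====
-- the literal keyword list of A
def pvSearchKeywords : List String :=
  ["what", "how", "why", "when", "where", "who", "explain",
   "search", "find", "latest", "news", "?", "tell me"]

-- any(text.lower().startswith(kw) or f" {kw}" in text.lower() for kw in search_keywords)
def is_search_query_py (text : String) : Bool :=
  pvSearchKeywords.any (fun kw =>
    PySem.Chars.startswith (PySem.Chars.lower text.toList) kw.toList ||
    PySem.Chars.isIn (' ' :: kw.toList) (PySem.Chars.lower text.toList))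

-- ===== PORT B =====
-- any(t.startswith(kw, i) for kw in keywords)
def pvMatchAny (s : List Char) : Bool :=
  pvSearchKeywords.any (fun kw => PySem.Chars.startswith s kw.toList)

-- the for-loop of B: 'boundary' is True at position 0 or after a space
def pvAltScan : Bool → List Char → Bool
  | _, [] => false
  | boundary, c :: cs => (boundary && pvMatchAny (c :: cs)) || pvAltScan (c == ' ') cs

def is_search_query_py_alt (text : String) : Bool :=
  pvAltScan true (PySem.Chars.lower text.toList)

-- ===== PRECONDITION & SPEC =====
def Spec_is_search_query_py (text : String) (out : Bool) : Prop := out = is_search_query_py_alt text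
instance (text : String) (out : Bool) : Decidable (Spec_is_search_query_py text out) := by unfold Spec_is_search_query_py; infer_instance

-- ===== CLAIM (what is proved, stated in full; the proofs are below) =====
def Claim_equal_is_search_query_py : Prop := ∀ (text : String), Dom_is_search_query_py text → Spec_is_search_query_py text (is_search_query_py text)

-- ===== LEMMAS AND PROOFS =====

theorem pvMatchAny_nil : pvMatchAny [] = false := by decide

-- characterisation of B's scan: a keyword matches at the start (if the flag is set) or just after some space
theorem pvAltScan_iff (s : List Char) (b : Bool) :
    pvAltScan b s = true ↔
      (b = true ∧ pvMatchAny s = true) ∨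
      ∃ u w, s = u ++ ' ' :: w ∧ pvMatchAny w = true := by
  induction s generalizing b with
  | nil =>
    simp [pvAltScan, pvMatchAny_nil]
  | cons c cs ih =>
    simp only [pvAltScan, Bool.or_eq_true, Bool.and_eq_true, ih]
    constructor
    · rintro (⟨hb, hm⟩ | ⟨hc, hm⟩ | ⟨u, w, rfl, hm⟩)
      · exact Or.inl ⟨hb, hm⟩
      · exact Or.inr ⟨[], cs, by simp [beq_iff_eq.mp hc], hm⟩
      · exact Or.inr ⟨c :: u, w, rfl, hm⟩
    · rintro (⟨hb, hm⟩ | ⟨u, w, hcw, hm⟩)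
      · exact Or.inl ⟨hb, hm⟩
      · cases u with
        | nil =>
          simp only [List.nil_append, List.cons.injEq] at hcw
          exact Or.inr (Or.inl ⟨by simp [hcw.1], hcw.2 ▸ hm⟩)
        | cons x u' =>
          simp only [List.cons_append, List.cons.injEq] at hcw
          exact Or.inr (Or.inr ⟨u', w, hcw.2, hm⟩)

-- A's '" " + kw in s' is: kw matches just after some space of s
theorem pvIsIn_space_iff (kw : List Char) (s : List Char) :
    PySem.Chars.isIn (' ' :: kw) s = true ↔ ∃ u w, s = u ++ ' ' :: w ∧ kw <+: w := by
  rw [PySem.Chars.isIn_iff_infix]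
  constructor
  · rintro ⟨u, v, rfl⟩
    exact ⟨u, kw ++ v, by simp, ⟨v, rfl⟩⟩
  · rintro ⟨u, w, rfl, v, rfl⟩
    exact ⟨u, v, by simp⟩

theorem pvMatchAny_iff (s : List Char) :
    pvMatchAny s = true ↔ ∃ kw ∈ pvSearchKeywords, kw.toList <+: s := by
  simp [pvMatchAny, PySem.Chars.startswith_iff]

-- ===== VERDICT (by name: the statement is the Claim_ definition above) =====
theorem is_search_query_py_spec : Claim_equal_is_search_query_py := by
  intro text _
  unfold Spec_is_search_query_py is_search_query_py is_search_query_py_alt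
  set s := PySem.Chars.lower text.toList with hs
  rw [Bool.eq_iff_iff]
  rw [List.any_eq_true, pvAltScan_iff]
  constructor
  · rintro ⟨kw, hkw, hor⟩
    rcases Bool.or_eq_true _ _ |>.mp hor with h | h
    · exact Or.inl ⟨rfl, (pvMatchAny_iff s).mpr ⟨kw, hkw, (PySem.Chars.startswith_iff _ _).mp h⟩⟩
    · obtain ⟨u, w, hsw, hp⟩ := (pvIsIn_space_iff kw.toList s).mp h
      exact Or.inr ⟨u, w, hsw, (pvMatchAny_iff w).mpr ⟨kw, hkw, hp⟩⟩
  · rintro (⟨_, hm⟩ | ⟨u, w, hsw, hm⟩)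
    · obtain ⟨kw, hkw, hp⟩ := (pvMatchAny_iff s).mp hm
      exact ⟨kw, hkw, Bool.or_eq_true _ _ |>.mpr (Or.inl ((PySem.Chars.startswith_iff _ _).mpr hp))⟩
    · obtain ⟨kw, hkw, hp⟩ := (pvMatchAny_iff w).mp hm
      exact ⟨kw, hkw, Bool.or_eq_true _ _ |>.mpr (Or.inr ((pvIsIn_space_iff kw.toList s).mpr ⟨u, w, hsw, hp⟩))⟩
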